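-- pv_equiv track=rewrite | github.com/mcc0nnell/dig-salesforce | tools/geary/recipes.py | validate_graph
-- ===== SOURCE A (Python) =====
-- def validate_graph(nodes, edges):
--     errors = []
--     start_nodes = [nid for nid, data in nodes.items() if data.get("type") == "start"]
--     end_nodes = [nid for nid, data in nodes.items() if data.get("type") == "end"]
--     if len(start_nodes) != 1:
--         errors.append("Exactly one Start node required")
--     if len(end_nodes) != 1:
--         errors.append("Exactly one End node required")
--
--     outgoing = {nid: [] for nid in nodes}
--     incoming = {nid: [] for nid in nodes}
--     for edge in edges:
--         outgoing.setdefault(edge["source"], []).append(edge)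
--         incoming.setdefault(edge["target"], []).append(edge)
--
--     for nid, data in nodes.items():
--         if data.get("type") == "decision":
--             if not outgoing.get(nid):
--                 errors.append(f"Decision {nid} has no outgoing edges")
--             for edge in outgoing.get(nid, []):
--                 if not edge.get("label"):
--                     errors.append(f"Decision {nid} outgoing edge missing label")
--
--     # orphan nodes
--     for nid in nodes:
--         if nid in start_nodes:
--             continue
--         if not incoming.get(nid):
--             errors.append(f"Node {nid} is unreachable")
--
--     # cycle detection
--     visited = set()
--     visiting = set()
--
--     def visit(node):
--         if node in visiting:
--             return True
--         if node in visited: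
--             return False
--         visiting.add(node)
--         for edge in outgoing.get(node, []):
--             if visit(edge["target"]):
--                 return True
--         visiting.remove(node)
--         visited.add(node)
--         return False
--
--     if start_nodes:
--         if visit(start_nodes[0]):
--             errors.append("Graph is cyclic")
--
--     return errors
-- ===== SOURCE B (Python) =====
-- def validate_graph(nodes, edges):
--     # one pass over edges: adjacency src -> [(target, label)], plus the set of edge targets
--     adj = {}
--     targets = set()
--     for e in edges:
--         adj.setdefault(e["source"], []).append((e["target"], e.get("label")))
--         targets.add(e["target"])
--
--     # one pass over nodes: start list, end count, decision errors, orphan errors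
--     starts = []
--     end_count = 0
--     dec_errors = []
--     orphan_errors = []
--     for nid, data in nodes.items():
--         t = data.get("type")
--         if t == "start":
--             starts.append(nid)
--         elif t == "end":
--             end_count += 1
--         if t == "decision":
--             out = adj.get(nid, [])
--             if not out:
--                 dec_errors.append(f"Decision {nid} has no outgoing edges")
--             else:
--                 dec_errors.extend(f"Decision {nid} outgoing edge missing label"
--                                   for _tgt, lab in out if not lab)
--         if t != "start" and nid not in targets:
--             orphan_errors.append(f"Node {nid} is unreachable")
--
--     errors = []
--     if len(starts) != 1:
--         errors.append("Exactly one Start node required")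
--     if end_count != 1:
--         errors.append("Exactly one End node required")
--     errors += dec_errors
--     errors += orphan_errors
--
--     # iterative stack-based DFS from starts[0] looking for a back edge
--     if starts:
--         root = starts[0]
--         stack = [(root, 0)]
--         visiting = {root}
--         visited = set()
--         cyclic = False
--         while stack:
--             node, i = stack[-1]
--             succ = adj.get(node, [])
--             if len(succ) <= i:
--                 stack.pop()
--                 visiting.remove(node)
--                 visited.add(node)
--                 continue
--             stack[-1] = (node, i + 1)
--             tgt = succ[i][0]
--             if tgt in visiting:
--                 cyclic = True
--                 break
--             if tgt not in visited:
--                 stack.append((tgt, 0))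
--                 visiting.add(tgt)
--         if cyclic:
--             errors.append("Graph is cyclic")
--
--     return errors
-- ===== Notes on version B (the rewrite author's own statement) =====
-- stated objective: alternative
-- what changed: B fuses A's four separate node passes (start/end comprehensions, decision loop, orphan loop) into one pass with four accumulators, builds a single source->(target,label) adjacency map plus a target set in one edge pass instead of A's two edge-dict maps, and replaces the recursive cycle-detection visit by an iterative stack-based DFS with explicit (node, edge-index) frames.
import Mathlib
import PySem

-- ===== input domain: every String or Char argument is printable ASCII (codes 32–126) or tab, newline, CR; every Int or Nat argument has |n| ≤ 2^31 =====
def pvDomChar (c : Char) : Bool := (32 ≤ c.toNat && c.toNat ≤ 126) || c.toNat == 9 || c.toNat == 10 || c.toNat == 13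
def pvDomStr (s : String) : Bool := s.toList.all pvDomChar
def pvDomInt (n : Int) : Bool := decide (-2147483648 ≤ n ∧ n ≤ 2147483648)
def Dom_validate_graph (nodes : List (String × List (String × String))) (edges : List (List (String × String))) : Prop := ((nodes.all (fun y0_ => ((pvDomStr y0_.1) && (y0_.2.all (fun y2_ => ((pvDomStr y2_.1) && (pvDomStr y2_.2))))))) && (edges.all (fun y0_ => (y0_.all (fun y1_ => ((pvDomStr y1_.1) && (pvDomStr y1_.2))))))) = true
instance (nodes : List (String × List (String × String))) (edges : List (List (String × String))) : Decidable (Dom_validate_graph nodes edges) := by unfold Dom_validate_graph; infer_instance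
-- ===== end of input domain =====

-- B replaces A's four comprehensions/loops by one fused pass over the nodes (and one over the
-- edges building a single (target,label) adjacency plus a target set instead of two edge-dict
-- maps), and replaces the recursive cycle `visit` by an iterative stack-based DFS; same value.

-- ===== PORT A =====
-- `d.get(k)` on a str→str dict given as its item list
def pvGet? (d : List (String × String)) (k : String) : Option String :=
  (PySem.Dict.mk d).get? k

-- edge["source"] / edge["target"]: Pre_ guarantees the key is present (Python raises KeyError
-- otherwise), so the `.getD ""` default is never reached on admitted inputs.
def pvKey (e : List (String × String)) (k : String) : String := (pvGet? e k).getD ""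

-- A's recursive `visit`, with the visiting/visited sets as lists (only membership, add of a
-- fresh element and remove are used) and a fuel argument making the recursion total;
-- `none` = fuel exhausted (proved unreachable below for the fuel the port passes).
mutual
def visitA (out : PySem.Dict String (List (List (String × String)))) :
    Nat → String → List String → List String → Option (Bool × List String × List String)
  | 0, _, _, _ => none
  | f + 1, node, vg, vb =>
    if vg.contains node then some (true, vg, vb)
    else if vb.contains node then some (false, vg, vb)
    else
      match goA out f (out.getD node []) (node :: vg) vb with
      | none => none
      | some (true, vg', vb') => some (true, vg', vb')
      | some (false, vg', vb') => some (false, vg'.erase node, node :: vb')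
termination_by f _ _ _ => (f, 0)

def goA (out : PySem.Dict String (List (List (String × String)))) :
    Nat → List (List (String × String)) → List String → List String →
    Option (Bool × List String × List String)
  | _, [], vg, vb => some (false, vg, vb)
  | f, e :: es, vg, vb =>
    match visitA out f (pvKey e "target") vg vb with
    | none => none
    | some (true, vg', vb') => some (true, vg', vb')
    | some (false, vg', vb') => goA out f es vg' vb'
termination_by f es _ _ => (f, es.length + 1)
end

def validate_graph (nodes : List (String × List (String × String)))
    (edges : List (List (String × String))) : List String :=
  let start_nodes := (nodes.filter (fun p => pvGet? p.2 "type" == some "start")).map (fun p => p.1)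
  let end_nodes := (nodes.filter (fun p => pvGet? p.2 "type" == some "end")).map (fun p => p.1)
  let errors : List String := []
  let errors := if start_nodes.length ≠ 1 then errors ++ ["Exactly one Start node required"] else errors
  let errors := if end_nodes.length ≠ 1 then errors ++ ["Exactly one End node required"] else errors
  -- outgoing/incoming: {nid: [] for nid in nodes}, then setdefault(...).append(edge)
  -- (setdefault + in-place append ≡ Dict.modify with default [], appending)
  let outgoing0 : PySem.Dict String (List (List (String × String))) :=
    nodes.foldl (fun d p => d.insert p.1 []) PySem.Dict.empty
  let incoming0 : PySem.Dict String (List (List (String × String))) :=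
    nodes.foldl (fun d p => d.insert p.1 []) PySem.Dict.empty
  let oi := edges.foldl (fun (oi : PySem.Dict String (List (List (String × String))) × PySem.Dict String (List (List (String × String)))) e =>
      (oi.1.modify (pvKey e "source") [] (fun l => l ++ [e]),
       oi.2.modify (pvKey e "target") [] (fun l => l ++ [e]))) (outgoing0, incoming0)
  let outgoing := oi.1
  let incoming := oi.2
  -- decision checks; `not outgoing.get(nid)` is "None or empty list", i.e. getD [] = []
  let errors := nodes.foldl (fun acc p =>
      if pvGet? p.2 "type" == some "decision" then
        let acc := if outgoing.getD p.1 [] = [] then acc ++ ["Decision " ++ p.1 ++ " has no outgoing edges"] else acc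
        (outgoing.getD p.1 []).foldl (fun acc2 e =>
            if (pvGet? e "label").getD "" = "" then acc2 ++ ["Decision " ++ p.1 ++ " outgoing edge missing label"] else acc2) acc
      else acc) errors
  -- orphan nodes
  let errors := nodes.foldl (fun acc p =>
      if start_nodes.contains p.1 then acc
      else if incoming.getD p.1 [] = [] then acc ++ ["Node " ++ p.1 ++ " is unreachable"] else acc) errors
  -- cycle detection from start_nodes[0]
  match start_nodes with
  | [] => errors
  | root :: _ =>
    match visitA outgoing (edges.length + 2) root [] [] with
    | some (true, _, _) => errors ++ ["Graph is cyclic"]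
    | _ => errors

-- ===== PORT B =====
-- adjacency src -> [(target, label)], built in one pass (setdefault+append ≡ modify)
def pvAdjB (edges : List (List (String × String))) :
    PySem.Dict String (List (String × Option String)) :=
  edges.foldl (fun d e =>
      d.modify (pvKey e "source") [] (fun l => l ++ [(pvKey e "target", pvGet? e "label")]))
    PySem.Dict.empty

def pvTargetsB (edges : List (List (String × String))) : PySem.Set String :=
  edges.foldl (fun s e => PySem.Set.add s (pvKey e "target")) PySem.Set.empty

-- the four independent accumulator updates of Source B's single pass over nodes.items()
def pvStartsUpd (st : List String) (p : String × List (String × String)) : List String :=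
  if pvGet? p.2 "type" == some "start" then st ++ [p.1] else st

def pvEndUpd (c : Int) (p : String × List (String × String)) : Int :=
  if pvGet? p.2 "type" == some "start" then c
  else if pvGet? p.2 "type" == some "end" then c + 1 else c

def pvDecUpd (adj : PySem.Dict String (List (String × Option String)))
    (dec : List String) (p : String × List (String × String)) : List String :=
  if pvGet? p.2 "type" == some "decision" then
    let out := adj.getD p.1 []
    if out = [] then dec ++ ["Decision " ++ p.1 ++ " has no outgoing edges"]
    else dec ++ (out.filter (fun q => q.2.getD "" == "")).map
        (fun _ => "Decision " ++ p.1 ++ " outgoing edge missing label")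
  else dec

def pvOrphUpd (targets : PySem.Set String)
    (orph : List String) (p : String × List (String × String)) : List String :=
  if !(pvGet? p.2 "type" == some "start") && !(PySem.Set.contains targets p.1) then
    orph ++ ["Node " ++ p.1 ++ " is unreachable"]
  else orph

-- termination measure for the iterative DFS (not part of Source B's computation)
def pvTset (adj : PySem.Dict String (List (String × Option String))) : Finset String :=
  (adj.values.flatMap (fun l => l.map (fun q => q.1))).toFinset

-- three small facts feeding the termination proof of the loop below
theorem pvSub_pop (T : Finset String) (node : String) (vg vb : List String) :
    (T \ ((vg.erase node).toFinset ∪ (node :: vb).toFinset)).card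
      ≤ (T \ (vg.toFinset ∪ vb.toFinset)).card := by
  apply Finset.card_le_card
  intro x hx
  simp only [Finset.mem_sdiff, Finset.mem_union, List.mem_toFinset, List.toFinset_cons,
    Finset.mem_insert] at hx ⊢
  refine ⟨hx.1, fun hmem => hx.2 ?_⟩
  cases hmem with
  | inl hvg =>
    by_cases hx2 : x = node
    · exact Or.inr (Or.inl hx2)
    · exact Or.inl ((List.mem_erase_of_ne hx2).mpr hvg)
  | inr hvb => exact Or.inr (Or.inr hvb)

theorem pvGetD_mem_values_or_nil {κ ν : Type} [BEq κ] [LawfulBEq κ]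
    (d : PySem.Dict κ (List ν)) (k : κ) :
    d.getD k [] = [] ∨ d.getD k [] ∈ d.values := by
  cases hg : d.get? k with
  | none => left; simp [PySem.Dict.getD_eq_get?_getD, hg]
  | some v =>
    right
    have hm := PySem.Dict.mem_items_of_get?_eq_some d hg
    have hv : v ∈ d.values := by
      simp only [PySem.Dict.values]
      exact List.mem_map.mpr ⟨(k, v), hm, rfl⟩
    simpa [PySem.Dict.getD_eq_get?_getD, hg] using hv

theorem pvMem_tset (adj : PySem.Dict String (List (String × Option String)))
    (node : String) (i : Nat) (hi : i < (adj.getD node []).length) :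
    ((adj.getD node []).getD i ("", none)).1 ∈ pvTset adj := by
  have hmemlist : (adj.getD node []).getD i ("", none) ∈ adj.getD node [] := by
    rw [List.getD_eq_getElem?_getD, List.getElem?_eq_getElem hi]
    exact List.getElem_mem hi
  have hval : adj.getD node [] ∈ adj.values := by
    rcases pvGetD_mem_values_or_nil adj node with hnil | hv
    · rw [hnil] at hi; exact absurd hi (Nat.not_lt_zero i)
    · exact hv
  unfold pvTset
  rw [List.mem_toFinset, List.mem_flatMap]
  exact ⟨adj.getD node [], hval, List.mem_map.mpr ⟨_, hmemlist, rfl⟩⟩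

theorem pvCard_push (T : Finset String) (tgt : String) (vg vb : List String)
    (hT : tgt ∈ T) (hnvg : tgt ∉ vg) (hnvb : tgt ∉ vb) :
    (T \ ((tgt :: vg).toFinset ∪ vb.toFinset)).card < (T \ (vg.toFinset ∪ vb.toFinset)).card := by
  apply Finset.card_lt_card
  constructor
  · intro x hx
    simp only [Finset.mem_sdiff, Finset.mem_union, List.mem_toFinset, List.toFinset_cons,
      Finset.mem_insert] at hx ⊢
    refine ⟨hx.1, fun hmem => hx.2 ?_⟩
    cases hmem with
    | inl hvg => exact Or.inl (Or.inr hvg)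
    | inr hvb => exact Or.inr hvb
  · intro hcon
    have h1 : tgt ∈ T \ (vg.toFinset ∪ vb.toFinset) := by
      simp only [Finset.mem_sdiff, Finset.mem_union, List.mem_toFinset]
      refine ⟨hT, fun hmem => ?_⟩
      cases hmem with
      | inl h => exact hnvg h
      | inr h => exact hnvb h
    have h2 := hcon h1
    simp at h2

-- Source B's while-loop: stack of (node, next-edge-index) frames, gray list vg, black list vb
def pvLoopB (adj : PySem.Dict String (List (String × Option String))) :
    List (String × Nat) → List String → List String → Bool
  | [], _, _ => false
  | (node, i) :: rest, vg, vb =>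
    -- succ = adj.get(node, []); tgt = succ[i][0]
    if h : (adj.getD node []).length ≤ i then
      pvLoopB adj rest (vg.erase node) (node :: vb)
    else
      if hvg : vg.contains ((adj.getD node []).getD i ("", none)).1 then true
      else if hvb : vb.contains ((adj.getD node []).getD i ("", none)).1 then
        pvLoopB adj ((node, i + 1) :: rest) vg vb
      else
        pvLoopB adj ((((adj.getD node []).getD i ("", none)).1, 0) :: (node, i + 1) :: rest)
          (((adj.getD node []).getD i ("", none)).1 :: vg) vb
termination_by stack vg vb =>
  ((pvTset adj \ (vg.toFinset ∪ vb.toFinset)).card,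
   (stack.map (fun p => (adj.getD p.1 []).length - p.2)).sum, stack.length)
decreasing_by
  · rcases lt_or_eq_of_le (pvSub_pop (pvTset adj) node vg vb) with h1 | h1
    · exact Prod.Lex.left _ _ h1
    · rw [h1]
      apply Prod.Lex.right
      have hm2 : (adj.getD node []).length - i = 0 := Nat.sub_eq_zero_of_le h
      simp only [List.map_cons, List.sum_cons, hm2, Nat.zero_add, List.length_cons]
      exact Prod.Lex.right _ (Nat.lt_succ_self _)
  · apply Prod.Lex.right
    apply Prod.Lex.left
    simp only [List.map_cons, List.sum_cons]
    exact Nat.add_lt_add_right (Nat.sub_succ_lt_self _ _ (Nat.lt_of_not_le h)) _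
  · exact Prod.Lex.left _ _
      (pvCard_push (pvTset adj) _ vg vb
        (pvMem_tset adj node i (Nat.lt_of_not_le h))
        (fun hm => hvg (List.contains_iff_mem.mpr hm))
        (fun hm => hvb (List.contains_iff_mem.mpr hm)))

def validate_graph_alt (nodes : List (String × List (String × String)))
    (edges : List (List (String × String))) : List String :=
  let adj := pvAdjB edges
  let targets := pvTargetsB edges
  let st := nodes.foldl (fun st p =>
      (pvStartsUpd st.1 p, (pvEndUpd st.2.1 p,
        (pvDecUpd adj st.2.2.1 p, pvOrphUpd targets st.2.2.2 p))))
    (([], (0, ([], []))) : List String × Int × List String × List String)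
  let starts := st.1
  let end_count := st.2.1
  let dec_errors := st.2.2.1
  let orphan_errors := st.2.2.2
  let errors : List String := if starts.length ≠ 1 then ["Exactly one Start node required"] else []
  let errors := if end_count ≠ 1 then errors ++ ["Exactly one End node required"] else errors
  let errors := errors ++ dec_errors ++ orphan_errors
  match starts with
  | [] => errors
  | root :: _ =>
    if pvLoopB adj [(root, 0)] [root] [] then errors ++ ["Graph is cyclic"] else errors

-- ===== PRECONDITION & SPEC =====
-- Pre_ requires (a) distinct node keys: `nodes` is a Python dict, whose keys are necessarily
-- distinct, so duplicate-key association lists encode no Python input; (b) every edge dict to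
-- carry "source" and "target" keys, since A raises KeyError otherwise.
def Pre_validate_graph (nodes : List (String × List (String × String))) (edges : List (List (String × String))) : Prop :=
  (nodes.map Prod.fst).Nodup ∧
    ∀ e ∈ edges, "source" ∈ e.map Prod.fst ∧ "target" ∈ e.map Prod.fst
instance (nodes : List (String × List (String × String))) (edges : List (List (String × String))) : Decidable (Pre_validate_graph nodes edges) := by unfold Pre_validate_graph; infer_instance

def pvWitness_validate_graph : (List (String × List (String × String))) × (List (List (String × String))) :=
  ([("a", [("type", "start")]), ("b", [("type", "end")])],
   [[("source", "a"), ("target", "b")]])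

def Spec_validate_graph (nodes : List (String × List (String × String))) (edges : List (List (String × String))) (out : List String) : Prop := out = validate_graph_alt nodes edges
instance (nodes : List (String × List (String × String))) (edges : List (List (String × String))) (out : List String) : Decidable (Spec_validate_graph nodes edges out) := by unfold Spec_validate_graph; infer_instance

-- ===== CLAIM (what is proved, stated in full; the proofs are below) =====
def Claim_equal_validate_graph : Prop := ∀ (nodes : List (String × List (String × String))) (edges : List (List (String × String))), Dom_validate_graph nodes edges → Pre_validate_graph nodes edges → Spec_validate_graph nodes edges (validate_graph nodes edges)

-- ===== LEMMAS AND PROOFS =====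

-- proof-side names for the two dictionaries A builds and their lookup characterizations
def pvOutD (nodes : List (String × List (String × String)))
    (edges : List (List (String × String))) :
    PySem.Dict String (List (List (String × String))) :=
  edges.foldl (fun d e => d.modify (pvKey e "source") [] (fun l => l ++ [e]))
    (nodes.foldl (fun d p => d.insert p.1 []) PySem.Dict.empty)

def pvIncD (nodes : List (String × List (String × String)))
    (edges : List (List (String × String))) :
    PySem.Dict String (List (List (String × String))) :=
  edges.foldl (fun d e => d.modify (pvKey e "target") [] (fun l => l ++ [e]))
    (nodes.foldl (fun d p => d.insert p.1 []) PySem.Dict.empty)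

def pvEm (e : List (String × String)) : String × Option String :=
  (pvKey e "target", pvGet? e "label")

theorem pvInit_getD (nodes : List (String × List (String × String))) (k : String) :
    (nodes.foldl (fun d p => d.insert p.1 []) PySem.Dict.empty).getD k
      ([] : List (List (String × String))) = [] := by
  have aux : ∀ (l : List (String × List (String × String)))
      (d : PySem.Dict String (List (List (String × String)))),
      (∀ k', d.getD k' [] = []) →
      ∀ k', (l.foldl (fun d p => d.insert p.1 []) d).getD k' [] = [] := by
    intro l
    induction l with
    | nil => intro d hd k'; simpa using hd k'
    | cons p t ih =>
      intro d hd k'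
      simp only [List.foldl_cons]
      apply ih
      intro k''
      rw [PySem.Dict.getD_insert]
      split
      · rfl
      · exact hd k''
  exact aux nodes PySem.Dict.empty (fun k' => by simp [PySem.Dict.getD_empty]) k

theorem pvBuild_getD {β : Type} (key : List (String × String) → String)
    (val : List (String × String) → β) (edges : List (List (String × String)))
    (d : PySem.Dict String (List β)) (k : String) :
    (edges.foldl (fun d e => d.modify (key e) [] (fun l => l ++ [val e])) d).getD k []
      = d.getD k [] ++ (edges.filter (fun e => key e == k)).map val := by
  have h1 : edges.foldl (fun d e => d.modify (key e) [] (fun l => l ++ [val e])) d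
      = (edges.map (fun e => (key e, val e))).foldl
          (fun d p => d.modify p.1 [] (fun l => l ++ [p.2])) d := by
    rw [List.foldl_map]
  rw [h1, PySem.Dict.getD_foldl_modify_append]
  congr 1
  rw [List.filter_map, List.map_map]
  rfl

theorem pvOutD_getD (nodes : List (String × List (String × String)))
    (edges : List (List (String × String))) (k : String) :
    (pvOutD nodes edges).getD k [] = edges.filter (fun e => pvKey e "source" == k) := by
  unfold pvOutD
  rw [pvBuild_getD (fun e => pvKey e "source") (fun e => e)]
  rw [pvInit_getD]
  simp

theorem pvIncD_getD (nodes : List (String × List (String × String)))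
    (edges : List (List (String × String))) (k : String) :
    (pvIncD nodes edges).getD k [] = edges.filter (fun e => pvKey e "target" == k) := by
  unfold pvIncD
  rw [pvBuild_getD (fun e => pvKey e "target") (fun e => e)]
  rw [pvInit_getD]
  simp

theorem pvAdjB_getD (edges : List (List (String × String))) (k : String) :
    (pvAdjB edges).getD k [] = (edges.filter (fun e => pvKey e "source" == k)).map pvEm := by
  unfold pvAdjB
  rw [pvBuild_getD (fun e => pvKey e "source") (fun e => (pvKey e "target", pvGet? e "label"))]
  simp [PySem.Dict.getD_empty, pvEm]

theorem pvAdjB_rel (nodes : List (String × List (String × String)))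
    (edges : List (List (String × String))) (k : String) :
    (pvAdjB edges).getD k [] = ((pvOutD nodes edges).getD k []).map pvEm := by
  rw [pvAdjB_getD, pvOutD_getD]

theorem pvTargetsB_eq (edges : List (List (String × String))) :
    pvTargetsB edges = PySem.Set.ofList (edges.map (fun e => pvKey e "target")) := by
  unfold pvTargetsB
  rw [PySem.Set.ofList_eq_foldl, List.foldl_map]
  rfl

theorem pvTargets_contains (edges : List (List (String × String))) (k : String) :
    PySem.Set.contains (pvTargetsB edges) k = !(edges.filter (fun e => pvKey e "target" == k)).isEmpty := by
  rw [pvTargetsB_eq]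
  have hmem : PySem.Set.contains (PySem.Set.ofList (edges.map (fun e => pvKey e "target"))) k = true
      ↔ k ∈ edges.map (fun e => pvKey e "target") := by
    rw [show PySem.Set.contains (PySem.Set.ofList (edges.map (fun e => pvKey e "target"))) k
        = List.contains (PySem.Set.ofList (edges.map (fun e => pvKey e "target"))) k from rfl]
    rw [List.contains_iff_mem]
    exact PySem.Set.mem_ofList _ _
  have h2 : ((edges.filter (fun e => pvKey e "target" == k)).isEmpty = false)
      ↔ k ∈ edges.map (fun e => pvKey e "target") := by
    constructor
    · intro h
      obtain ⟨e, he⟩ := List.isEmpty_eq_false_iff_exists_mem.mp h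
      obtain ⟨he1, he2⟩ := List.mem_filter.mp he
      exact List.mem_map.mpr ⟨e, he1, by simpa using he2⟩
    · intro hm
      obtain ⟨e, he, hk⟩ := List.mem_map.mp hm
      exact List.isEmpty_eq_false_iff_exists_mem.mpr
        ⟨e, List.mem_filter.mpr ⟨he, by simp [hk]⟩⟩
  cases hb : (edges.filter (fun e => pvKey e "target" == k)).isEmpty with
  | false => simpa using hmem.mpr (h2.mp hb)
  | true =>
    simp only [Bool.not_true]
    rw [Bool.eq_false_iff]
    intro hc
    rw [h2.mpr (hmem.mp hc)] at hb
    cases hb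

-- flatMap congruence on members
theorem pvFlatMap_congr {α β : Type} (l : List α) (f g : α → List β)
    (h : ∀ x ∈ l, f x = g x) : l.flatMap f = l.flatMap g := by
  induction l with
  | nil => rfl
  | cons a t ih =>
    simp only [List.flatMap_cons]
    rw [h a (by simp), ih (fun x hx => h x (by simp [hx]))]

-- membership in A's start list is determined by the node's own data when keys are distinct
theorem pvStart_mem (nodes : List (String × List (String × String)))
    (hnd : (nodes.map Prod.fst).Nodup) (p : String × List (String × String)) (hp : p ∈ nodes) :
    ((nodes.filter (fun p => pvGet? p.2 "type" == some "start")).map (fun p => p.1)).contains p.1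
      = (pvGet? p.2 "type" == some "start") := by
  cases hs : (pvGet? p.2 "type" == some "start") with
  | true =>
    exact List.contains_iff_mem.mpr
      (List.mem_map.mpr ⟨p, List.mem_filter.mpr ⟨hp, hs⟩, rfl⟩)
  | false =>
    rw [Bool.eq_false_iff]
    intro hc
    obtain ⟨q, hqf, hq1⟩ := List.mem_map.mp (List.contains_iff_mem.mp hc)
    have hqn := (List.mem_filter.mp hqf).1
    have hqt := (List.mem_filter.mp hqf).2
    have hqp : q = p := List.inj_on_of_nodup_map hnd hqn hp hq1
    rw [hqp, hs] at hqt
    cases hqt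

-- a `some (false, …)` result of A's visit keeps visiting intact and only grows visited
theorem pvShape (out : PySem.Dict String (List (List (String × String)))) (f : Nat) :
    (∀ n vg vb vg' vb', visitA out f n vg vb = some (false, vg', vb') →
        vg' = vg ∧ ∀ x ∈ vb, x ∈ vb') ∧
    (∀ es vg vb vg' vb', goA out f es vg vb = some (false, vg', vb') →
        vg' = vg ∧ ∀ x ∈ vb, x ∈ vb') := by
  induction f with
  | zero =>
    constructor
    · intro n vg vb vg' vb' h; simp [visitA] at h
    · intro es vg vb vg' vb' h
      cases es with
      | nil =>
        simp only [goA, Option.some.injEq, Prod.mk.injEq, true_and] at h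
        exact ⟨h.1.symm, fun x hx => h.2 ▸ hx⟩
      | cons e t => simp [goA, visitA] at h
  | succ f IH =>
    have hV : ∀ n vg vb vg' vb', visitA out (f + 1) n vg vb = some (false, vg', vb') →
        vg' = vg ∧ ∀ x ∈ vb, x ∈ vb' := by
      intro n vg vb vg' vb' h
      simp only [visitA] at h
      split at h
      · simp at h
      · split at h
        · simp only [Option.some.injEq, Prod.mk.injEq, true_and] at h
          exact ⟨h.1.symm, fun x hx => h.2 ▸ hx⟩
        · cases hg : goA out f (out.getD n []) (n :: vg) vb with
          | none => rw [hg] at h; simp at h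
          | some r =>
            obtain ⟨c, vgI, vbI⟩ := r
            rw [hg] at h
            cases c
            · simp only [Option.some.injEq, Prod.mk.injEq, true_and] at h
              obtain ⟨h1, h2⟩ := h
              have hsh := IH.2 _ _ _ _ _ hg
              constructor
              · rw [← h1, hsh.1, List.erase_cons_head]
              · intro x hx
                rw [← h2]
                exact List.mem_cons_of_mem _ (hsh.2 x hx)
            · simp at h
    have hG : ∀ es vg vb vg' vb', goA out (f + 1) es vg vb = some (false, vg', vb') →
        vg' = vg ∧ ∀ x ∈ vb, x ∈ vb' := by
      intro es
      induction es with
      | nil =>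
        intro vg vb vg' vb' h
        simp only [goA, Option.some.injEq, Prod.mk.injEq, true_and] at h
        exact ⟨h.1.symm, fun x hx => h.2 ▸ hx⟩
      | cons e t ih =>
        intro vg vb vg' vb' h
        simp only [goA] at h
        cases hv : visitA out (f + 1) (pvKey e "target") vg vb with
        | none => rw [hv] at h; simp at h
        | some r =>
          obtain ⟨c, vg1, vb1⟩ := r
          rw [hv] at h
          cases c
          · have h1 := hV _ _ _ _ _ hv
            simp only at h
            have h2 := ih _ _ _ _ h
            exact ⟨h2.1.trans h1.1, fun x hx => h2.2 x (h1.2 x hx)⟩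
          · simp at h
    exact ⟨hV, hG⟩

-- the fuel A's port passes is sufficient: visit/go return `some` when the fuel exceeds the
-- number of still-unvisited possible targets
theorem pvSuff (out : PySem.Dict String (List (List (String × String)))) (T : Finset String)
    (hGH : ∀ n, ∀ e ∈ out.getD n [], pvKey e "target" ∈ T) (f : Nat) :
    (∀ n vg vb, n ∈ T → (T \ (vg.toFinset ∪ vb.toFinset)).card < f →
        (visitA out f n vg vb).isSome) ∧
    (∀ es vg vb, (∀ e ∈ es, pvKey e "target" ∈ T) →
        (T \ (vg.toFinset ∪ vb.toFinset)).card < f → (goA out f es vg vb).isSome) := by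
  induction f with
  | zero =>
    constructor
    · intro n vg vb _ hcard; exact absurd hcard (Nat.not_lt_zero _)
    · intro es vg vb _ hcard; exact absurd hcard (Nat.not_lt_zero _)
  | succ f IH =>
    have hV : ∀ n vg vb, n ∈ T → (T \ (vg.toFinset ∪ vb.toFinset)).card < f + 1 →
        (visitA out (f + 1) n vg vb).isSome := by
      intro n vg vb hn hcard
      by_cases hnvg : n ∈ vg
      · simp [visitA, hnvg]
      · by_cases hnvb : n ∈ vb
        · simp [visitA, hnvg, hnvb]
        · simp only [visitA]
          rw [if_neg (by simpa using hnvg), if_neg (by simpa using hnvb)]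
          have hmemn : n ∈ T \ (vg.toFinset ∪ vb.toFinset) := by
            simp only [Finset.mem_sdiff, Finset.mem_union, List.mem_toFinset]
            exact ⟨hn, fun h => h.elim hnvg hnvb⟩
          have hset : T \ ((n :: vg).toFinset ∪ vb.toFinset)
              = (T \ (vg.toFinset ∪ vb.toFinset)).erase n := by
            ext x
            simp only [Finset.mem_sdiff, Finset.mem_union, List.mem_toFinset,
              List.toFinset_cons, Finset.mem_insert, Finset.mem_erase, List.mem_toFinset]
            tauto
          have hcard' : (T \ ((n :: vg).toFinset ∪ vb.toFinset)).card < f := by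
            rw [hset, Finset.card_erase_of_mem hmemn]
            have hpos : 0 < (T \ (vg.toFinset ∪ vb.toFinset)).card :=
              Finset.card_pos.mpr ⟨n, hmemn⟩
            omega
          have hs := IH.2 (out.getD n []) (n :: vg) vb (fun e he => hGH n e he) hcard'
          obtain ⟨r, hr⟩ := Option.isSome_iff_exists.mp hs
          rw [hr]
          obtain ⟨c, vg1, vb1⟩ := r
          cases c <;> simp
    have hG : ∀ es vg vb, (∀ e ∈ es, pvKey e "target" ∈ T) →
        (T \ (vg.toFinset ∪ vb.toFinset)).card < f + 1 → (goA out (f + 1) es vg vb).isSome := by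
      intro es
      induction es with
      | nil => intro vg vb _ _; simp [goA]
      | cons e t ih =>
        intro vg vb hT hcard
        simp only [goA]
        have hs := hV (pvKey e "target") vg vb (hT e (by simp)) hcard
        obtain ⟨r, hr⟩ := Option.isSome_iff_exists.mp hs
        rw [hr]
        obtain ⟨c, vg1, vb1⟩ := r
        cases c
        · have hsh := (pvShape out (f + 1)).1 _ _ _ _ _ hr
          simp only
          apply ih vg1 vb1 (fun e' he' => hT e' (by simp [he']))
          have hsub : T \ (vg1.toFinset ∪ vb1.toFinset) ⊆ T \ (vg.toFinset ∪ vb.toFinset) := by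
            intro x hx
            simp only [Finset.mem_sdiff, Finset.mem_union, List.mem_toFinset, hsh.1] at hx ⊢
            exact ⟨hx.1, fun h => hx.2 (h.elim Or.inl (fun hb => Or.inr (hsh.2 x hb)))⟩
          exact lt_of_le_of_lt (Finset.card_le_card hsub) hcard
        · simp
    exact ⟨hV, hG⟩

-- the stack machine of B simulates A's recursive visit
theorem pvSim (out : PySem.Dict String (List (List (String × String))))
    (adj : PySem.Dict String (List (String × Option String)))
    (hrel : ∀ k, adj.getD k [] = (out.getD k []).map pvEm) (f : Nat) :
    ∀ n i vg vb res rest, goA out f ((out.getD n []).drop i) vg vb = some res →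
      pvLoopB adj ((n, i) :: rest) vg vb
        = (if res.1 then true else pvLoopB adj rest (vg.erase n) (n :: res.2.2)) := by
  induction f using Nat.strong_induction_on with
  | _ f IHf =>
  intro n
  have hlenadj : ∀ k, (adj.getD k []).length = (out.getD k []).length := by
    intro k; rw [hrel k, List.length_map]
  have base : ∀ i vg vb res rest, (out.getD n []).length ≤ i →
      goA out f ((out.getD n []).drop i) vg vb = some res →
      pvLoopB adj ((n, i) :: rest) vg vb
        = (if res.1 then true else pvLoopB adj rest (vg.erase n) (n :: res.2.2)) := by
    intro i vg vb res rest hlen hgo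
    rw [List.drop_eq_nil_of_le hlen] at hgo
    simp only [goA, Option.some.injEq] at hgo
    subst hgo
    rw [pvLoopB.eq_2]
    rw [dif_pos (by rw [hlenadj]; exact hlen)]
    simp
  suffices H : ∀ m i vg vb res rest, (out.getD n []).length - i ≤ m →
      goA out f ((out.getD n []).drop i) vg vb = some res →
      pvLoopB adj ((n, i) :: rest) vg vb
        = (if res.1 then true else pvLoopB adj rest (vg.erase n) (n :: res.2.2)) by
    intro i vg vb res rest hgo
    exact H ((out.getD n []).length - i) i vg vb res rest le_rfl hgo
  intro m
  induction m with
  | zero =>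
    intro i vg vb res rest hm hgo
    exact base i vg vb res rest (by omega) hgo
  | succ m IHm =>
    intro i vg vb res rest hm hgo
    by_cases hlen : (out.getD n []).length ≤ i
    · exact base i vg vb res rest hlen hgo
    · have hi : i < (out.getD n []).length := Nat.lt_of_not_le hlen
      rw [List.drop_eq_getElem_cons hi] at hgo
      simp only [goA] at hgo
      have htgt : ((adj.getD n []).getD i ("", none)).1
          = pvKey ((out.getD n [])[i]) "target" := by
        rw [hrel n, List.getD_eq_getElem?_getD, List.getElem?_map, List.getElem?_eq_getElem hi]
        simp [pvEm]
      rw [pvLoopB.eq_2]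
      rw [dif_neg (by rw [hlenadj]; exact hlen)]
      rw [htgt]
      cases hv : visitA out f (pvKey ((out.getD n [])[i]) "target") vg vb with
      | none => rw [hv] at hgo; simp at hgo
      | some r =>
        obtain ⟨c, vg1, vb1⟩ := r
        rw [hv] at hgo
        cases c
        · -- the inner visit returned False: A continues with the next edge
          simp only at hgo
          by_cases hmvg : pvKey ((out.getD n [])[i]) "target" ∈ vg
          · exfalso
            have hf : f ≠ 0 := by rintro rfl; simp [visitA] at hv
            obtain ⟨f', rfl⟩ := Nat.exists_eq_succ_of_ne_zero hf
            simp only [visitA] at hv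
            rw [if_pos (by simpa using hmvg)] at hv
            simp at hv
          · rw [dif_neg (fun hc => hmvg (List.contains_iff_mem.mp hc))]
            have hf : f ≠ 0 := by rintro rfl; simp [visitA] at hv
            obtain ⟨f', rfl⟩ := Nat.exists_eq_succ_of_ne_zero hf
            by_cases hmvb : pvKey ((out.getD n [])[i]) "target" ∈ vb
            · -- already visited: B skips the edge
              simp only [visitA] at hv
              rw [if_neg (by simpa using hmvg), if_pos (by simpa using hmvb)] at hv
              simp only [Option.some.injEq, Prod.mk.injEq, true_and] at hv
              obtain ⟨hv1, hv2⟩ := hv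
              rw [dif_pos (List.contains_iff_mem.mpr hmvb)]
              rw [← hv1, ← hv2] at hgo
              exact IHm (i + 1) vg vb res rest (by omega) hgo
            · -- fresh target: B pushes a frame where A recurses
              simp only [visitA] at hv
              rw [if_neg (by simpa using hmvg), if_neg (by simpa using hmvb)] at hv
              cases hg2 : goA out f' (out.getD (pvKey ((out.getD n [])[i]) "target") [])
                  (pvKey ((out.getD n [])[i]) "target" :: vg) vb with
              | none => rw [hg2] at hv; simp at hv
              | some r2 =>
                obtain ⟨c2, vg2, vb2⟩ := r2
                rw [hg2] at hv
                cases c2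
                · simp only [Option.some.injEq, Prod.mk.injEq, true_and] at hv
                  obtain ⟨hv1, hv2⟩ := hv
                  have hsh := (pvShape out f').2 _ _ _ _ _ hg2
                  rw [dif_neg (fun hc => hmvb (List.contains_iff_mem.mp hc))]
                  have hstep := IHf f' (by omega) (pvKey ((out.getD n [])[i]) "target") 0
                    (pvKey ((out.getD n [])[i]) "target" :: vg) vb (false, vg2, vb2)
                    ((n, i + 1) :: rest) (by rw [List.drop_zero]; exact hg2)
                  rw [hstep]
                  simp only [Bool.false_eq_true, if_false, List.erase_cons_head]
                  have hvg1 : vg1 = vg := by rw [← hv1, hsh.1, List.erase_cons_head]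
                  rw [hvg1, ← hv2] at hgo
                  exact IHm (i + 1) vg (pvKey ((out.getD n [])[i]) "target" :: vb2) res rest
                    (by omega) hgo
                · simp at hv
        · -- the inner visit returned True: both sides report a cycle
          simp only [Option.some.injEq] at hgo
          subst hgo
          by_cases hmvg : pvKey ((out.getD n [])[i]) "target" ∈ vg
          · rw [dif_pos (List.contains_iff_mem.mpr hmvg)]; simp
          · rw [dif_neg (fun hc => hmvg (List.contains_iff_mem.mp hc))]
            have hf : f ≠ 0 := by rintro rfl; simp [visitA] at hv
            obtain ⟨f', rfl⟩ := Nat.exists_eq_succ_of_ne_zero hf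
            simp only [visitA] at hv
            rw [if_neg (by simpa using hmvg)] at hv
            by_cases hmvb : pvKey ((out.getD n [])[i]) "target" ∈ vb
            · rw [if_pos (by simpa using hmvb)] at hv; simp at hv
            · rw [if_neg (by simpa using hmvb)] at hv
              rw [dif_neg (fun hc => hmvb (List.contains_iff_mem.mp hc))]
              cases hg2 : goA out f' (out.getD (pvKey ((out.getD n [])[i]) "target") [])
                  (pvKey ((out.getD n [])[i]) "target" :: vg) vb with
              | none => rw [hg2] at hv; simp at hv
              | some r2 =>
                obtain ⟨c2, vg2, vb2⟩ := r2
                rw [hg2] at hv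
                cases c2
                · simp at hv
                · have hstep := IHf f' (by omega) (pvKey ((out.getD n [])[i]) "target") 0
                    (pvKey ((out.getD n [])[i]) "target" :: vg) vb (true, vg2, vb2)
                    ((n, i + 1) :: rest) (by rw [List.drop_zero]; exact hg2)
                  rw [hstep]
                  simp

-- per-node error lists (proof-side reformulation of the two decision/orphan loop bodies)
def pvHA (outg : PySem.Dict String (List (List (String × String))))
    (p : String × List (String × String)) : List String :=
  if pvGet? p.2 "type" == some "decision" then
    (if outg.getD p.1 [] = [] then ["Decision " ++ p.1 ++ " has no outgoing edges"] else [])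
      ++ ((outg.getD p.1 []).filter (fun e => decide ((pvGet? e "label").getD "" = ""))).map
          (fun _ => "Decision " ++ p.1 ++ " outgoing edge missing label")
  else []

def pvHB (adj : PySem.Dict String (List (String × Option String)))
    (p : String × List (String × String)) : List String :=
  if pvGet? p.2 "type" == some "decision" then
    if adj.getD p.1 [] = [] then ["Decision " ++ p.1 ++ " has no outgoing edges"]
    else ((adj.getD p.1 []).filter (fun q => q.2.getD "" == "")).map
        (fun _ => "Decision " ++ p.1 ++ " outgoing edge missing label")
  else []

def pvOA (starts : List String) (inc : PySem.Dict String (List (List (String × String))))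
    (p : String × List (String × String)) : List String :=
  if starts.contains p.1 then []
  else if inc.getD p.1 [] = [] then ["Node " ++ p.1 ++ " is unreachable"] else []

def pvOB (targets : PySem.Set String) (p : String × List (String × String)) : List String :=
  if !(pvGet? p.2 "type" == some "start") && !(PySem.Set.contains targets p.1) then
    ["Node " ++ p.1 ++ " is unreachable"]
  else []

theorem pvDecFoldA (outg : PySem.Dict String (List (List (String × String))))
    (nodes : List (String × List (String × String))) (init : List String) :
    nodes.foldl (fun acc p =>
      if pvGet? p.2 "type" == some "decision" then
        let acc := if outg.getD p.1 [] = [] then acc ++ ["Decision " ++ p.1 ++ " has no outgoing edges"] else acc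
        (outg.getD p.1 []).foldl (fun acc2 e =>
            if (pvGet? e "label").getD "" = "" then acc2 ++ ["Decision " ++ p.1 ++ " outgoing edge missing label"] else acc2) acc
      else acc) init = init ++ nodes.flatMap (pvHA outg) := by
  have hb : ∀ (acc : List String) (p : String × List (String × String)),
      (if pvGet? p.2 "type" == some "decision" then
        (outg.getD p.1 []).foldl (fun acc2 e =>
            if (pvGet? e "label").getD "" = "" then acc2 ++ ["Decision " ++ p.1 ++ " outgoing edge missing label"] else acc2)
          (if outg.getD p.1 [] = [] then acc ++ ["Decision " ++ p.1 ++ " has no outgoing edges"] else acc)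
      else acc) = acc ++ pvHA outg p := by
    intro acc p
    unfold pvHA
    by_cases hd : (pvGet? p.2 "type" == some "decision") = true
    · rw [if_pos hd, if_pos hd]
      rw [PySem.List.foldl_append_ite (p := fun e => (pvGet? e "label").getD "" = "")
        (f := fun _ => "Decision " ++ p.1 ++ " outgoing edge missing label")]
      by_cases he : outg.getD p.1 [] = []
      · rw [if_pos he, if_pos he]; simp [he]
      · rw [if_neg he, if_neg he]; simp
    · rw [if_neg hd, if_neg hd]; simp
  calc nodes.foldl (fun acc p =>
      if pvGet? p.2 "type" == some "decision" then
        let acc := if outg.getD p.1 [] = [] then acc ++ ["Decision " ++ p.1 ++ " has no outgoing edges"] else acc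
        (outg.getD p.1 []).foldl (fun acc2 e =>
            if (pvGet? e "label").getD "" = "" then acc2 ++ ["Decision " ++ p.1 ++ " outgoing edge missing label"] else acc2) acc
      else acc) init
      = nodes.foldl (fun acc p => acc ++ pvHA outg p) init :=
        PySem.List.foldl_congr_mem _ _ _ _ (fun acc x _ => hb acc x)
    _ = init ++ nodes.flatMap (pvHA outg) := PySem.List.foldl_append_eq_flatMap _ _ _

theorem pvDecFoldB (adj : PySem.Dict String (List (String × Option String)))
    (nodes : List (String × List (String × String))) :
    nodes.foldl (pvDecUpd adj) [] = nodes.flatMap (pvHB adj) := by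
  have hb : ∀ (acc : List String) (p : String × List (String × String)),
      pvDecUpd adj acc p = acc ++ pvHB adj p := by
    intro acc p
    unfold pvDecUpd pvHB
    by_cases hd : (pvGet? p.2 "type" == some "decision") = true
    · rw [if_pos hd, if_pos hd]
      by_cases he : adj.getD p.1 [] = []
      · rw [if_pos he, if_pos he]
      · rw [if_neg he, if_neg he]
    · rw [if_neg hd, if_neg hd]; simp
  calc nodes.foldl (pvDecUpd adj) []
      = nodes.foldl (fun acc p => acc ++ pvHB adj p) [] :=
        PySem.List.foldl_congr_mem _ _ _ _ (fun acc x _ => hb acc x)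
    _ = nodes.flatMap (pvHB adj) := by
        rw [PySem.List.foldl_append_eq_flatMap]; simp

theorem pvOrphFoldA (starts : List String)
    (inc : PySem.Dict String (List (List (String × String))))
    (nodes : List (String × List (String × String))) (init : List String) :
    nodes.foldl (fun acc p =>
      if starts.contains p.1 then acc
      else if inc.getD p.1 [] = [] then acc ++ ["Node " ++ p.1 ++ " is unreachable"] else acc) init
    = init ++ nodes.flatMap (pvOA starts inc) := by
  have hb : ∀ (acc : List String) (p : String × List (String × String)),
      (if starts.contains p.1 then acc
       else if inc.getD p.1 [] = [] then acc ++ ["Node " ++ p.1 ++ " is unreachable"] else acc)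
      = acc ++ pvOA starts inc p := by
    intro acc p
    unfold pvOA
    by_cases h1 : starts.contains p.1 = true
    · rw [if_pos h1, if_pos h1]; simp
    · rw [if_neg h1, if_neg h1]
      by_cases h2 : inc.getD p.1 [] = []
      · rw [if_pos h2, if_pos h2]
      · rw [if_neg h2, if_neg h2]; simp
  calc nodes.foldl (fun acc p =>
      if starts.contains p.1 then acc
      else if inc.getD p.1 [] = [] then acc ++ ["Node " ++ p.1 ++ " is unreachable"] else acc) init
      = nodes.foldl (fun acc p => acc ++ pvOA starts inc p) init :=
        PySem.List.foldl_congr_mem _ _ _ _ (fun acc x _ => hb acc x)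
    _ = init ++ nodes.flatMap (pvOA starts inc) := PySem.List.foldl_append_eq_flatMap _ _ _

theorem pvOrphFoldB (targets : PySem.Set String)
    (nodes : List (String × List (String × String))) :
    nodes.foldl (pvOrphUpd targets) [] = nodes.flatMap (pvOB targets) := by
  have hb : ∀ (acc : List String) (p : String × List (String × String)),
      pvOrphUpd targets acc p = acc ++ pvOB targets p := by
    intro acc p
    unfold pvOrphUpd pvOB
    by_cases h1 : (!(pvGet? p.2 "type" == some "start") && !(PySem.Set.contains targets p.1)) = true
    · rw [if_pos h1, if_pos h1]
    · rw [if_neg h1, if_neg h1]; simp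
  calc nodes.foldl (pvOrphUpd targets) []
      = nodes.foldl (fun acc p => acc ++ pvOB targets p) [] :=
        PySem.List.foldl_congr_mem _ _ _ _ (fun acc x _ => hb acc x)
    _ = nodes.flatMap (pvOB targets) := by
        rw [PySem.List.foldl_append_eq_flatMap]; simp

theorem pvHAB (nodes : List (String × List (String × String)))
    (edges : List (List (String × String))) (p : String × List (String × String)) :
    pvHA (pvOutD nodes edges) p = pvHB (pvAdjB edges) p := by
  unfold pvHA pvHB
  by_cases hd : (pvGet? p.2 "type" == some "decision") = true
  · rw [if_pos hd, if_pos hd]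
    rw [pvAdjB_rel nodes edges]
    by_cases he : (pvOutD nodes edges).getD p.1 [] = []
    · simp [he]
    · rw [if_neg he, if_neg (by simpa using he)]
      rw [List.filter_map, List.map_map]
      have hp : ((fun q : String × Option String => q.2.getD "" == "") ∘ pvEm)
          = fun e => decide ((pvGet? e "label").getD "" = "") := by
        funext e
        simp only [pvEm, Function.comp]
        cases h : decide ((pvGet? e "label").getD "" = "") <;> simp_all
      rw [hp]
      simp only [List.nil_append]
      exact List.map_congr_left fun a _ => rfl
  · rw [if_neg hd, if_neg hd]

theorem pvOAB (nodes : List (String × List (String × String)))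
    (edges : List (List (String × String))) (hnd : (nodes.map Prod.fst).Nodup)
    (p : String × List (String × String)) (hp : p ∈ nodes) :
    pvOA ((nodes.filter (fun p => pvGet? p.2 "type" == some "start")).map (fun p => p.1))
        (pvIncD nodes edges) p
      = pvOB (pvTargetsB edges) p := by
  unfold pvOA pvOB
  rw [pvStart_mem nodes hnd p hp, pvIncD_getD, pvTargets_contains]
  by_cases hs : (pvGet? p.2 "type" == some "start") = true
  · rw [if_pos hs]; simp [hs]
  · rw [if_neg hs]
    rw [Bool.not_eq_true] at hs
    by_cases he : edges.filter (fun e => pvKey e "target" == p.1) = []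
    · rw [if_pos he]
      simp [hs, he]
    · rw [if_neg he]
      have : (edges.filter (fun e => pvKey e "target" == p.1)).isEmpty = false := by
        simpa [List.isEmpty_iff] using he
      simp [hs, this]

-- the two cycle verdicts agree: A's visit returns, and B's loop computes its flag
theorem pvCycle (nodes : List (String × List (String × String)))
    (edges : List (List (String × String))) (root : String) :
    ∃ c a b, visitA (pvOutD nodes edges) (edges.length + 2) root [] [] = some (c, a, b)
      ∧ pvLoopB (pvAdjB edges) [(root, 0)] [root] [] = c := by
  have hrel : ∀ k, (pvAdjB edges).getD k [] = ((pvOutD nodes edges).getD k []).map pvEm :=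
    pvAdjB_rel nodes edges
  have hGH : ∀ n, ∀ e ∈ (pvOutD nodes edges).getD n [],
      pvKey e "target" ∈ (edges.map (fun e => pvKey e "target")).toFinset := by
    intro n e he
    rw [pvOutD_getD] at he
    exact List.mem_toFinset.mpr (List.mem_map.mpr ⟨e, (List.mem_filter.mp he).1, rfl⟩)
  have hcard : ((edges.map (fun e => pvKey e "target")).toFinset
      \ (([root] : List String).toFinset ∪ ([] : List String).toFinset)).card
      < edges.length + 1 := by
    have h1 := Finset.card_le_card (Finset.sdiff_subset
      (s := (edges.map (fun e => pvKey e "target")).toFinset)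
      (t := ([root] : List String).toFinset ∪ ([] : List String).toFinset))
    have h2 := List.toFinset_card_le (edges.map (fun e => pvKey e "target"))
    rw [List.length_map] at h2
    omega
  have hsome := (pvSuff (pvOutD nodes edges) (edges.map (fun e => pvKey e "target")).toFinset
    hGH (edges.length + 1)).2 ((pvOutD nodes edges).getD root []) [root] []
    (fun e he => hGH root e he) hcard
  obtain ⟨res, hres⟩ := Option.isSome_iff_exists.mp hsome
  obtain ⟨c, a, b⟩ := res
  have hloop := pvSim (pvOutD nodes edges) (pvAdjB edges) hrel (edges.length + 1) root 0
    [root] [] (c, a, b) [] (by rw [List.drop_zero]; exact hres)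
  cases c
  · have hv : visitA (pvOutD nodes edges) (edges.length + 2) root [] []
        = some (false, a.erase root, root :: b) := by
      show visitA (pvOutD nodes edges) (edges.length + 1 + 1) root [] [] = _
      simp only [visitA]
      rw [if_neg (by simp), if_neg (by simp), hres]
    have hnil : pvLoopB (pvAdjB edges) [] (([root] : List String).erase root) (root :: b)
        = false := by rw [pvLoopB.eq_1]
    have hfalse : pvLoopB (pvAdjB edges) [(root, 0)] [root] [] = false := by
      rw [hloop]
      simpa using hnil
    exact ⟨false, a.erase root, root :: b, hv, hfalse⟩
  · have hv : visitA (pvOutD nodes edges) (edges.length + 2) root [] []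
        = some (true, a, b) := by
      show visitA (pvOutD nodes edges) (edges.length + 1 + 1) root [] [] = _
      simp only [visitA]
      rw [if_neg (by simp), if_neg (by simp), hres]
    have htrue : pvLoopB (pvAdjB edges) [(root, 0)] [root] [] = true := by
      rw [hloop]; simp
    exact ⟨true, a, b, hv, htrue⟩

theorem pvOi_eq (nodes : List (String × List (String × String)))
    (edges : List (List (String × String))) :
    edges.foldl (fun (oi : PySem.Dict String (List (List (String × String))) × PySem.Dict String (List (List (String × String)))) e =>
      (oi.1.modify (pvKey e "source") [] (fun l => l ++ [e]),
       oi.2.modify (pvKey e "target") [] (fun l => l ++ [e])))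
      (nodes.foldl (fun d p => d.insert p.1 []) PySem.Dict.empty,
       nodes.foldl (fun d p => d.insert p.1 []) PySem.Dict.empty)
    = (pvOutD nodes edges, pvIncD nodes edges) := by
  have h := PySem.List.foldl_prod_mk
    (f := fun (d : PySem.Dict String (List (List (String × String)))) e =>
      d.modify (pvKey e "source") [] (fun l => l ++ [e]))
    (g := fun (d : PySem.Dict String (List (List (String × String)))) e =>
      d.modify (pvKey e "target") [] (fun l => l ++ [e]))
    edges (nodes.foldl (fun d p => d.insert p.1 []) PySem.Dict.empty)
    (nodes.foldl (fun d p => d.insert p.1 []) PySem.Dict.empty)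
  simpa [pvOutD, pvIncD] using h

theorem pvStFold_eq (adj : PySem.Dict String (List (String × Option String)))
    (targets : PySem.Set String) (nodes : List (String × List (String × String))) :
    nodes.foldl (fun st p =>
      (pvStartsUpd st.1 p, (pvEndUpd st.2.1 p,
        (pvDecUpd adj st.2.2.1 p, pvOrphUpd targets st.2.2.2 p))))
      (([], (0, ([], []))) : List String × Int × List String × List String)
    = (nodes.foldl pvStartsUpd [],
       (nodes.foldl pvEndUpd 0,
        (nodes.foldl (pvDecUpd adj) [], nodes.foldl (pvOrphUpd targets) []))) := by
  suffices H : ∀ (a : List String) (b : Int) (c d : List String),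
      nodes.foldl (fun st p =>
        (pvStartsUpd st.1 p, (pvEndUpd st.2.1 p,
          (pvDecUpd adj st.2.2.1 p, pvOrphUpd targets st.2.2.2 p)))) (a, (b, (c, d)))
      = (nodes.foldl pvStartsUpd a,
         (nodes.foldl pvEndUpd b,
          (nodes.foldl (pvDecUpd adj) c, nodes.foldl (pvOrphUpd targets) d))) by
    exact H [] 0 [] []
  induction nodes with
  | nil => intro a b c d; rfl
  | cons p t ih => intro a b c d; simp only [List.foldl_cons]; exact ih _ _ _ _

theorem pvStarts_eq (nodes : List (String × List (String × String))) :
    nodes.foldl pvStartsUpd []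
      = (nodes.filter (fun p => pvGet? p.2 "type" == some "start")).map (fun p => p.1) := by
  unfold pvStartsUpd
  have h := PySem.List.foldl_append_if
    (fun (p : String × List (String × String)) => pvGet? p.2 "type" == some "start")
    (fun p => p.1) nodes []
  simpa using h

theorem pvEnd_eq (nodes : List (String × List (String × String))) :
    nodes.foldl pvEndUpd 0
      = ((nodes.countP (fun p => pvGet? p.2 "type" == some "end") : Nat) : Int) := by
  have h1 : nodes.foldl pvEndUpd 0
      = nodes.foldl (fun (c : Int) p =>
          if (pvGet? p.2 "type" == some "end") = true then c + 1 else c) 0 := by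
    apply PySem.List.foldl_congr_mem
    intro acc p _
    unfold pvEndUpd
    by_cases h1 : pvGet? p.2 "type" = some "start"
    · simp [h1]
    · by_cases h2 : pvGet? p.2 "type" = some "end" <;> simp [h1, h2]
  rw [h1, PySem.List.foldl_if_add_one]
  simp

-- ===== VERDICT (by name: the statement is the Claim_ definition above) =====
theorem validate_graph_spec : Claim_equal_validate_graph := by
  unfold Claim_equal_validate_graph
  intro nodes edges _ hpre
  obtain ⟨hnd, -⟩ := hpre
  unfold Spec_validate_graph
  simp only [validate_graph, validate_graph_alt]
  rw [pvOi_eq, pvStFold_eq]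
  simp only [List.nil_append]
  rw [pvStarts_eq, pvEnd_eq, pvDecFoldA, pvDecFoldB, pvOrphFoldA, pvOrphFoldB]
  rw [pvFlatMap_congr nodes (pvHA (pvOutD nodes edges)) (pvHB (pvAdjB edges))
    (fun p _ => pvHAB nodes edges p)]
  rw [pvFlatMap_congr nodes _ (pvOB (pvTargetsB edges))
    (fun p hp => pvOAB nodes edges hnd p hp)]
  have hiff : (((nodes.countP (fun p => pvGet? p.2 "type" == some "end") : Nat) : Int) ≠ 1)
      ↔ (((nodes.filter (fun p => pvGet? p.2 "type" == some "end")).map (fun p => p.1)).length ≠ 1) := by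
    rw [List.length_map, ← List.countP_eq_length_filter]
    constructor <;> intro h <;> omega
  rw [if_congr hiff rfl rfl]
  cases hstart : (nodes.filter (fun p => pvGet? p.2 "type" == some "start")).map (fun p => p.1) with
  | nil => rfl
  | cons root t =>
    obtain ⟨c, a, b, hv, hflag⟩ := pvCycle nodes edges root
    cases c
    · simp [hv, hflag]
    · simp [hv, hflag]
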